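-- pv_equiv track=rewrite | github.com/DiegoVa6/heuristica-optimizacion | practica_01_programacion_lineal/glpk/gen-2.py | valor_objetivo
-- ===== SOURCE A (Python) =====
-- import itertools
--
-- def valor_objetivo(C, asign):
--     # Suma C[i-1][k-1] por cada par (i,k) que comparte la MISMA franja s (independientemente del taller)
--     total = 0
--     buses = sorted(asign.keys())
--     for i, k in itertools.combinations(buses, 2):
--         s_i, _ = asign[i]
--         s_k, _ = asign[k]
--         if s_i == s_k:
--             total += C[i-1][k-1]
--     return total
-- ===== SOURCE B (Python) =====
-- import itertools
--
-- def valor_objetivo(C, asign):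
--     # Group buses by franja first, then sum C over pairs inside each group only.
--     buses = sorted(asign.keys())
--     pares = [(asign[b][0], b) for b in buses]
--     groups = {}
--     for s, b in pares:
--         groups.setdefault(s, []).append(b)
--     total = 0
--     for grp in groups.values():
--         total += sum(C[i-1][k-1] for i, k in itertools.combinations(grp, 2))
--     return total
-- ===== Notes on version B (the rewrite author's own statement) =====
-- stated objective: alternative
-- what changed: B first builds a franja -> buses index (dict of groups over the sorted keys) and sums C only over pairs inside each group, instead of scanning all key pairs and testing s_i == s_k.
import Mathlib
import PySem

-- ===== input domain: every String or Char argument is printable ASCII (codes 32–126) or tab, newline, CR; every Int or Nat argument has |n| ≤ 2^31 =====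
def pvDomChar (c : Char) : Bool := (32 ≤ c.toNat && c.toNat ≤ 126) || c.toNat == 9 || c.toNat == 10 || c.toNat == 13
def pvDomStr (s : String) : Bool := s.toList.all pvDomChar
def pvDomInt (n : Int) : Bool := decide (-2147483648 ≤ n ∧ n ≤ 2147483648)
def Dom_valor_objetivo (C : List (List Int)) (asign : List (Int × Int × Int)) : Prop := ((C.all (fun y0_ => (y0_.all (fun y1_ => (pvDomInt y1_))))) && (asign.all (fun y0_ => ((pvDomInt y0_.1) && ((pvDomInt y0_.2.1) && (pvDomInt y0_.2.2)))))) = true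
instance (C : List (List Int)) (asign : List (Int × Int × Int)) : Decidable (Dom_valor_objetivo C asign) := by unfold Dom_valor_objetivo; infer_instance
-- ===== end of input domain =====

-- B groups the buses by franja first and sums C only over same-group pairs,
-- instead of scanning all key pairs and testing s_i == s_k (objective: alternative traversal).

-- itertools.combinations(l, 2), in itertools' order (shared helper of both ports)
def pvCombos2 {α : Type} : List α → List (α × α)
  | [] => []
  | x :: xs => xs.map (fun y => (x, y)) ++ pvCombos2 xs

-- C[i-1][k-1] (total form; Pre_ guarantees the accessed entries are in range)
def pvW (C : List (List Int)) (q : Int × Int) : Int :=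
  PySem.List.pyGetD (PySem.List.pyGetD C (q.1 - 1) []) (q.2 - 1) 0

-- ===== PORT A =====
def valor_objetivo (C : List (List Int)) (asign : List (Int × Int × Int)) : Int :=
  let d := PySem.Dict.ofList asign
  let buses := PySem.List.sorted d.keys (fun x => x) false
  (pvCombos2 buses).foldl (fun total q =>
    if (d.getD q.1 (0, 0)).1 == (d.getD q.2 (0, 0)).1 then total + pvW C q else total) 0

-- ===== PORT B =====
def valor_objetivo_alt (C : List (List Int)) (asign : List (Int × Int × Int)) : Int :=
  let d := PySem.Dict.ofList asign
  let buses := PySem.List.sorted d.keys (fun x => x) false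
  let pares := buses.map (fun b => ((d.getD b (0, 0)).1, b))
  let groups := pares.foldl (fun g p => g.modify p.1 [] (· ++ [p.2])) PySem.Dict.empty
  groups.values.foldl (fun total grp => total + ((pvCombos2 grp).map (pvW C)).sum) 0

-- ===== PRECONDITION & SPEC =====
-- Pre_ excludes exactly the inputs where Python A raises IndexError: a same-franja
-- key pair i < k whose C[i-1][k-1] access is out of range.
def Pre_valor_objetivo (C : List (List Int)) (asign : List (Int × Int × Int)) : Prop :=
  ∀ p ∈ (PySem.Dict.ofList asign).items, ∀ q ∈ (PySem.Dict.ofList asign).items,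
    p.1 < q.1 → p.2.1 = q.2.1 →
      PySem.Raise.InRange C.length (p.1 - 1) ∧
      PySem.Raise.InRange (PySem.List.pyGetD C (p.1 - 1) []).length (q.1 - 1)
instance (C : List (List Int)) (asign : List (Int × Int × Int)) : Decidable (Pre_valor_objetivo C asign) := by unfold Pre_valor_objetivo; infer_instance

def pvWitness_valor_objetivo : List (List Int) × (List (Int × Int × Int)) :=
  ([[0, 5], [7, 0]], [(1, 4, 0), (2, 4, 1)])

def Spec_valor_objetivo (C : List (List Int)) (asign : List (Int × Int × Int)) (out : Int) : Prop := out = valor_objetivo_alt C asign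
instance (C : List (List Int)) (asign : List (Int × Int × Int)) (out : Int) : Decidable (Spec_valor_objetivo C asign out) := by unfold Spec_valor_objetivo; infer_instance

-- ===== CLAIM (what is proved, stated in full; the proofs are below) =====
def Claim_equal_valor_objetivo : Prop := ∀ (C : List (List Int)) (asign : List (Int × Int × Int)), Dom_valor_objetivo C asign → Pre_valor_objetivo C asign → Spec_valor_objetivo C asign (valor_objetivo C asign)

-- ===== LEMMAS AND PROOFS =====

theorem pvMem_combos2 {α : Type} (l : List α) (q : α × α) (h : q ∈ pvCombos2 l) :
    q.1 ∈ l ∧ q.2 ∈ l := by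
  induction l with
  | nil => simp [pvCombos2] at h
  | cons x xs ih =>
    simp only [pvCombos2, List.mem_append, List.mem_map] at h
    rcases h with ⟨y, hy, hq⟩ | h
    · subst hq; exact ⟨List.mem_cons_self, List.mem_cons_of_mem _ hy⟩
    · exact ⟨List.mem_cons_of_mem _ (ih h).1, List.mem_cons_of_mem _ (ih h).2⟩

theorem pvCombos2_filter {α : Type} (p : α → Bool) (l : List α) :
    pvCombos2 (l.filter p) = (pvCombos2 l).filter (fun q => p q.1 && p q.2) := by
  induction l with
  | nil => simp [pvCombos2]
  | cons x xs ih =>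
    by_cases hx : p x = true
    · simp [pvCombos2, hx, ih, List.filter_map, Function.comp_def]
    · simp only [Bool.not_eq_true] at hx
      simp [pvCombos2, hx, ih, List.filter_map, Function.comp_def]

theorem pvSum_map_add (l : List Int) (u v : Int → Int) :
    (l.map (fun x => u x + v x)).sum = (l.map u).sum + (l.map v).sum := by
  induction l with
  | nil => simp
  | cons x xs ih => simp [ih]; ring

theorem pvSum_single (vs : List Int) (c : Int) (a : Int) (hnd : vs.Nodup) (hc : c ∈ vs) :
    (vs.map (fun v => if c = v then a else 0)).sum = a := by
  induction vs with
  | nil => simp at hc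
  | cons v vs ih =>
    rcases List.mem_cons.mp hc with h | h
    · subst h
      have : (vs.map (fun v' => if c = v' then a else 0)) = vs.map (fun _ => 0) := by
        apply List.map_congr_left
        intro x hx
        have : c ≠ x := fun h => (List.nodup_cons.mp hnd).1 (h ▸ hx)
        simp [this]
      simp [this]
    · have hne : c ≠ v := fun he => (List.nodup_cons.mp hnd).1 (he ▸ h)
      simp [hne, ih (List.nodup_cons.mp hnd).2 h]

theorem pvFiber {β : Type} (vs : List Int) (Q : List β) (g : β → Int) (w : β → Int)
    (hnd : vs.Nodup) (hQ : ∀ q ∈ Q, g q ∈ vs) :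
    (vs.map (fun c => ((Q.filter (fun q => g q == c)).map w).sum)).sum = (Q.map w).sum := by
  induction Q with
  | nil => simp
  | cons q Q ih =>
    have hgq : g q ∈ vs := hQ q List.mem_cons_self
    have hrest : ∀ x ∈ Q, g x ∈ vs := fun x hx => hQ x (List.mem_cons_of_mem _ hx)
    have step : (vs.map (fun c => (((q :: Q).filter (fun r => g r == c)).map w).sum))
        = vs.map (fun c => (if g q = c then w q else 0) +
            ((Q.filter (fun r => g r == c)).map w).sum) := by
      apply List.map_congr_left
      intro c _
      by_cases h : g q = c
      · simp [h]
      · simp [h]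
    rw [step, pvSum_map_add, pvSum_single vs (g q) (w q) hnd hgq, ih hrest]
    simp

theorem valor_objetivo_eq (C : List (List Int)) (asign : List (Int × Int × Int)) :
    valor_objetivo C asign = valor_objetivo_alt C asign := by
  unfold valor_objetivo valor_objetivo_alt
  set d := PySem.Dict.ofList asign with hd
  set bs := PySem.List.sorted d.keys (fun x => x) false with hbs
  set f : Int → Int := fun b => (d.getD b (0, 0)).1 with hf
  -- A side: foldl-if = sum over the filtered pair list
  rw [PySem.List.foldl_if_eq_foldl_filter (p := fun q => f q.1 == f q.2)
        (f := fun total q => total + pvW C q),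
      PySem.List.foldl_add (g := pvW C)]
  -- B side: the groups dict
  have hkeys : (List.foldl (fun g p => g.modify p.1 [] (· ++ [p.2])) PySem.Dict.empty
      (bs.map (fun b => (f b, b)))).keys = PySem.Set.ofList ((bs.map (fun b => (f b, b))).map (·.1)) := by
    rw [PySem.Dict.keys_foldl_modify_key]
    simp [PySem.Set.update_nil_left, Function.comp_def]
  have hnodup : (List.foldl (fun g p => g.modify p.1 [] (· ++ [p.2])) PySem.Dict.empty
      (bs.map (fun b => (f b, b)))).keys.Nodup := by
    rw [hkeys]; exact PySem.Set.nodup_ofList _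
  rw [PySem.List.foldl_add (g := fun grp => ((pvCombos2 grp).map (pvW C)).sum),
      PySem.Dict.values_eq_map_keys _ hnodup [], hkeys]
  have hget : ∀ c, (List.foldl (fun g p => g.modify p.1 [] (· ++ [p.2])) PySem.Dict.empty
      (bs.map (fun b => (f b, b)))).getD c [] = bs.filter (fun b => f b == c) := by
    intro c
    rw [PySem.Dict.getD_foldl_modify_append]
    simp [List.filter_map, Function.comp_def]
  simp only [List.map_map, Function.comp_def, hget]
  rw [show (PySem.List.sorted d.keys (fun x => x) false) = bs from rfl]
  -- reduce B's per-group pair lists to filtered global pair lists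
  have hcomb : ∀ c, pvCombos2 (bs.filter (fun b => f b == c))
      = (pvCombos2 bs).filter (fun q => f q.1 == c && f q.2 == c) := by
    intro c; exact pvCombos2_filter (fun b => f b == c) bs
  simp only [hcomb]
  -- rewrite each fiber filter as (equal-franja filter) then (franja = c)
  have hfib : ∀ c, (pvCombos2 bs).filter (fun q => f q.1 == c && f q.2 == c)
      = ((pvCombos2 bs).filter (fun q => f q.1 == f q.2)).filter (fun q => f q.1 == c) := by
    intro c
    rw [List.filter_filter]
    apply List.filter_congr
    intro q _
    apply Bool.eq_iff_iff.mpr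
    simp only [Bool.and_eq_true, beq_iff_eq]
    omega
  simp only [hfib]
  -- fiberwise summation
  rw [pvFiber (PySem.Set.ofList (bs.map f))
        ((pvCombos2 bs).filter (fun q => f q.1 == f q.2))
        (fun q => f q.1) (pvW C) (PySem.Set.nodup_ofList _)
        (by
          intro q hq
          have hq1 : q.1 ∈ bs := (pvMem_combos2 bs q (List.mem_of_mem_filter hq)).1
          exact (PySem.Set.mem_ofList _ _).mpr (List.mem_map.mpr ⟨q.1, hq1, rfl⟩))]

-- ===== VERDICT (by name: the statement is the Claim_ definition above) =====
theorem valor_objetivo_spec : Claim_equal_valor_objetivo := by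
  intro C asign _ _
  unfold Spec_valor_objetivo
  exact valor_objetivo_eq C asign
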